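-- pv_equiv track=rewrite | github.com/hmc-chimp-s17/SDcountcode | SDcount.py | check_port_degrees
-- ===== SOURCE A (Python) =====
-- from collections import defaultdict
--
-- S = [("s", i) for i in (1, 2, 3)]  # Input ports
--
-- T = [("t", i) for i in (1, 2, 3)]  # Output ports
--
-- A = [("a", i) for i in (1, 2, 3)]  # Intermediate ports
--
-- B = [("b", i) for i in (1, 2, 3)]  # Intermediate ports
--
-- C = [("c", i) for i in (1, 2, 3)]  # Intermediate ports
--
-- def build_adjacency(edges):
--     """Build adjacency list from list of edges."""
--     adj = defaultdict(set)
--     for edge in edges: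
--         if isinstance(edge, frozenset):
--             u, v = tuple(edge)
--         else:
--             u, v = edge
--         adj[u].add(v)
--         adj[v].add(u)
--     return adj
--
-- def check_port_degrees(edges):
--     """
--     Check that each port has the correct degree:
--     - S ports (input): exactly 1 edge
--     - T ports (output): exactly 1 edge
--     - A, B, C ports (intermediate): exactly 2 edges
--     """
--     adj = build_adjacency(edges)
--
--     # Check S ports: degree 1
--     for port in S:
--         if len(adj[port]) != 1:
--             return False
--
--     # Check T ports: degree 1
--     for port in T:
--         if len(adj[port]) != 1:
--             return False
--
--     # Check A, B, C ports: degree 2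
--     for port in A + B + C:
--         if len(adj[port]) != 2:
--             return False
--
--     return True
-- ===== SOURCE B (Python) =====
-- S = [("s", i) for i in (1, 2, 3)]
-- T = [("t", i) for i in (1, 2, 3)]
-- A = [("a", i) for i in (1, 2, 3)]
-- B = [("b", i) for i in (1, 2, 3)]
-- C = [("c", i) for i in (1, 2, 3)]
--
-- def check_port_degrees(edges):
--     # Pass 1: deduplicate whole undirected edges.
--     dedup = set()
--     for edge in edges:
--         if isinstance(edge, frozenset):
--             u, v = tuple(edge)
--         else:
--             u, v = edge
--         dedup.add(frozenset((u, v)))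
--     # Pass 2: a port's degree is the number of distinct edges touching it.
--     requirements = [(p, 1) for p in S + T] + [(p, 2) for p in A + B + C]
--     return all(sum(1 for e in dedup if p in e) == d for p, d in requirements)
-- ===== Notes on version B (the rewrite author's own statement) =====
-- stated objective: alternative
-- what changed: Instead of building a per-node adjacency dict of neighbor sets in one pass, B deduplicates whole undirected edges into a set of frozensets in a first pass and then counts, for each required port, the deduped edges touching it.
import Mathlib
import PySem

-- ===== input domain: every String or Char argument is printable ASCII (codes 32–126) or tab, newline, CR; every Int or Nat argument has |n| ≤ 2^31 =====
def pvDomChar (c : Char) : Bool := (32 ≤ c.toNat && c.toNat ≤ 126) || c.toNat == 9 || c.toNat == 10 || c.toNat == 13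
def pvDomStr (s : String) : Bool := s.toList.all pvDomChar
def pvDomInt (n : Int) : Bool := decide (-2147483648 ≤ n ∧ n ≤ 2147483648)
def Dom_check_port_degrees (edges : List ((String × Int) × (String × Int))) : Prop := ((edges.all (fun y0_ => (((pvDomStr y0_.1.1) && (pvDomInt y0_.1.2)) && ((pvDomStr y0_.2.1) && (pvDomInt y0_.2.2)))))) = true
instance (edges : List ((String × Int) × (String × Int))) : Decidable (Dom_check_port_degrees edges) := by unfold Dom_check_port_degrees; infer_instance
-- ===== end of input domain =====

-- B replaces A's per-node adjacency-set dict by a dedup-whole-edges pass followed by counting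
-- deduped edges per port (alternative decomposition, same behaviour, similar cost).

-- ===== PORT A =====
def pvS : List (String × Int) := [("s", 1), ("s", 2), ("s", 3)]
def pvT : List (String × Int) := [("t", 1), ("t", 2), ("t", 3)]
def pvA : List (String × Int) := [("a", 1), ("a", 2), ("a", 3)]
def pvB : List (String × Int) := [("b", 1), ("b", 2), ("b", 3)]
def pvC : List (String × Int) := [("c", 1), ("c", 2), ("c", 3)]

-- adj[u].add(v); adj[v].add(u)  (defaultdict(set) with set values)
def pvAdjStep (d : PySem.Dict (String × Int) (PySem.Set (String × Int)))
    (e : (String × Int) × (String × Int)) : PySem.Dict (String × Int) (PySem.Set (String × Int)) :=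
  (d.modify e.1 [] (fun s => PySem.Set.add s e.2)).modify e.2 [] (fun s => PySem.Set.add s e.1)

-- build_adjacency; the isinstance(frozenset) branch is dead under the List-of-pairs input type
def pvBuildAdjacency (edges : List ((String × Int) × (String × Int))) :
    PySem.Dict (String × Int) (PySem.Set (String × Int)) :=
  edges.foldl pvAdjStep PySem.Dict.empty

-- defaultdict read 'len(adj[port])' only mutates adj (inserting an empty set), which the
-- return value cannot observe; ported as getD port ∅ (len of the empty default = 0).
def check_port_degrees (edges : List ((String × Int) × (String × Int))) : Bool :=
  let adj := pvBuildAdjacency edges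
  pvS.all (fun p => (adj.getD p []).length == 1) &&
  (pvT.all (fun p => (adj.getD p []).length == 1) &&
   (pvA ++ pvB ++ pvC).all (fun p => (adj.getD p []).length == 2))

-- ===== PORT B =====
-- frozenset((u, v)) represented as the pair with its endpoints in canonical order
-- (exact: two ≤2-element frozensets are equal iff their canonical pairs are equal).
def pvNorm (e : (String × Int) × (String × Int)) : (String × Int) × (String × Int) :=
  if e.1.1 < e.2.1 ∨ (e.1.1 = e.2.1 ∧ e.1.2 ≤ e.2.2) then e else (e.2, e.1)

def check_port_degrees_alt (edges : List ((String × Int) × (String × Int))) : Bool :=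
  let dedup : PySem.Set ((String × Int) × (String × Int)) :=
    edges.foldl (fun s e => PySem.Set.add s (pvNorm e)) PySem.Set.empty
  let requirements := (pvS ++ pvT).map (fun p => (p, 1)) ++ (pvA ++ pvB ++ pvC).map (fun p => (p, 2))
  -- sum(1 for e in dedup if p in e) == d : order-independent count over the set
  requirements.all (fun pd => dedup.countP (fun e => e.1 == pd.1 || e.2 == pd.1) == pd.2)

-- ===== PRECONDITION & SPEC =====
def Spec_check_port_degrees (edges : List ((String × Int) × (String × Int))) (out : Bool) : Prop := out = check_port_degrees_alt edges
instance (edges : List ((String × Int) × (String × Int))) (out : Bool) : Decidable (Spec_check_port_degrees edges out) := by unfold Spec_check_port_degrees; infer_instance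

-- ===== CLAIM (what is proved, stated in full; the proofs are below) =====
def Claim_equal_check_port_degrees : Prop := ∀ (edges : List ((String × Int) × (String × Int))), Dom_check_port_degrees edges → Spec_check_port_degrees edges (check_port_degrees edges)

-- ===== LEMMAS AND PROOFS =====

-- the relation the two folds maintain
def pvInv (adj : PySem.Dict (String × Int) (PySem.Set (String × Int)))
    (dedup : List ((String × Int) × (String × Int))) : Prop :=
  (∀ e ∈ dedup, pvNorm e = e) ∧ dedup.Nodup ∧
  (∀ p, (adj.getD p []).Nodup) ∧
  (∀ p v, v ∈ adj.getD p [] ↔ pvNorm (p, v) ∈ dedup)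

theorem pvTotal (a b : String) (m n : Int) (h1 : ¬(a < b ∨ (a = b ∧ m ≤ n)))
    (h2 : ¬(b < a ∨ (b = a ∧ n ≤ m))) : False := by
  rcases lt_trichotomy a b with h | h | h
  · exact h1 (Or.inl h)
  · subst h
    exact h1 (Or.inr ⟨rfl, by by_contra hc; exact h2 (Or.inr ⟨rfl, by omega⟩)⟩)
  · exact h2 (Or.inl h)

theorem pvNorm_swap (u v : String × Int) : pvNorm (u, v) = pvNorm (v, u) := by
  rcases u with ⟨a, m⟩; rcases v with ⟨b, n⟩
  unfold pvNorm
  simp only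
  split_ifs with h1 h2 h2
  · rcases h1 with h | ⟨h, hm⟩ <;> rcases h2 with h' | ⟨h', hn⟩
    · exact absurd h' (lt_asymm h)
    · subst h'; exact absurd h (lt_irrefl _)
    · subst h; exact absurd h' (lt_irrefl _)
    · subst h; simp [le_antisymm hm hn]
  · rfl
  · rfl
  · exact (pvTotal a b m n h1 h2).elim

theorem pvNorm_fix (e : (String × Int) × (String × Int)) : pvNorm (pvNorm e) = pvNorm e := by
  rcases e with ⟨⟨a, m⟩, ⟨b, n⟩⟩
  unfold pvNorm
  simp only
  split_ifs with h1 h2 <;> first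
    | rfl
    | exact (pvTotal a b m n h1 h2).elim

theorem pvNorm_cases (e : (String × Int) × (String × Int)) : pvNorm e = e ∨ pvNorm e = (e.2, e.1) := by
  unfold pvNorm; split_ifs <;> simp

theorem pvNorm_inj (p v w : String × Int) (h : pvNorm (p, v) = pvNorm (p, w)) : v = w := by
  rcases pvNorm_cases (p, v) with h1 | h1 <;> rcases pvNorm_cases (p, w) with h2 | h2 <;>
      rw [h1, h2] at h <;> simp only [Prod.mk.injEq] at h
  · exact h.2
  · exact h.2.trans h.1
  · exact h.1.trans h.2
  · exact h.1

theorem pvNorm_of_fst (e : (String × Int) × (String × Int)) (p : String × Int)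
    (hn : pvNorm e = e) (h : e.1 = p) : pvNorm (p, e.2) = e := by
  rw [← h]; exact hn
theorem pvNorm_of_snd (e : (String × Int) × (String × Int)) (p : String × Int)
    (hn : pvNorm e = e) (h : e.2 = p) : pvNorm (p, e.1) = e := by
  rw [← h, pvNorm_swap]; exact hn

theorem pvNorm_touch (p v : String × Int) : (pvNorm (p, v)).1 = p ∨ (pvNorm (p, v)).2 = p := by
  rcases pvNorm_cases (p, v) with h | h <;> rw [h] <;> simp

theorem pvInv_step (adj : PySem.Dict (String × Int) (PySem.Set (String × Int)))
    (dedup : List ((String × Int) × (String × Int)))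
    (e : (String × Int) × (String × Int)) (h : pvInv adj dedup) :
    pvInv (pvAdjStep adj e) (PySem.Set.add dedup (pvNorm e)) := by
  obtain ⟨hnorm, hnd, hvnd, hmem⟩ := h
  rcases e with ⟨u, v⟩
  have hgetD : ∀ p, (pvAdjStep adj (u, v)).getD p [] =
      (if p = v then PySem.Set.add ((adj.modify u [] (fun s => PySem.Set.add s v)).getD v []) u
       else (adj.modify u [] (fun s => PySem.Set.add s v)).getD p []) := by
    intro p
    simp [pvAdjStep, PySem.Dict.getD_modify]
  refine ⟨?_, ?_, ?_, ?_⟩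
  · intro x hx
    rw [PySem.Set.mem_add] at hx
    rcases hx with hx | hx
    · exact hnorm x hx
    · rw [hx]; exact pvNorm_fix (u, v)
  · exact PySem.Set.nodup_add _ _ hnd
  · intro p
    rw [hgetD]
    split_ifs with h1
    · apply PySem.Set.nodup_add
      rw [PySem.Dict.getD_modify]
      split_ifs with h2
      · exact PySem.Set.nodup_add _ _ (hvnd u)
      · exact hvnd v
    · rw [PySem.Dict.getD_modify]
      split_ifs with h2
      · exact PySem.Set.nodup_add _ _ (hvnd u)
      · exact hvnd p
  · intro p w
    rw [hgetD, PySem.Set.mem_add]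
    split_ifs with h1
    · rw [PySem.Set.mem_add, PySem.Dict.getD_modify]
      split_ifs with h2
      · -- p = v, v = u (self loop)
        subst h1; subst h2
        rw [PySem.Set.mem_add, hmem p w]
        constructor
        · rintro ((h | h) | h)
          · exact Or.inl h
          · right; rw [h]
          · right; rw [h]
        · rintro (h | h)
          · exact Or.inl (Or.inl h)
          · right; exact pvNorm_inj p w p h
      · -- p = v ≠ u
        subst h1
        rw [hmem p w]
        constructor
        · rintro (h | h)
          · exact Or.inl h
          · right; rw [h, pvNorm_swap]
        · rintro (h | h)
          · exact Or.inl h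
          · right; rw [pvNorm_swap u p] at h; exact pvNorm_inj p w u h
    · rw [PySem.Dict.getD_modify]
      split_ifs with h2
      · -- p = u, p ≠ v
        subst h2
        rw [PySem.Set.mem_add, hmem p w]
        constructor
        · rintro (h | h)
          · exact Or.inl h
          · right; rw [h]
        · rintro (h | h)
          · exact Or.inl h
          · right; exact pvNorm_inj p w v h
      · -- p ∉ {u, v}
        rw [hmem p w]
        constructor
        · exact Or.inl
        · rintro (h | h)
          · exact h
          · exfalso
            have ht := pvNorm_touch p w
            rw [h] at ht
            rcases pvNorm_cases (u, v) with hc | hc <;> rw [hc] at ht <;> simp only [] at ht <;>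
                rcases ht with ht | ht
            · exact h2 ht.symm
            · exact h1 ht.symm
            · exact h1 ht.symm
            · exact h2 ht.symm

theorem pvInv_fold (edges : List ((String × Int) × (String × Int)))
    (adj : PySem.Dict (String × Int) (PySem.Set (String × Int)))
    (dedup : List ((String × Int) × (String × Int))) (h : pvInv adj dedup) :
    pvInv (edges.foldl pvAdjStep adj)
      (edges.foldl (fun s e => PySem.Set.add s (pvNorm e)) dedup) := by
  induction edges generalizing adj dedup with
  | nil => exact h
  | cons e es ih => exact ih _ _ (pvInv_step adj dedup e h)

theorem pvInv_empty : pvInv PySem.Dict.empty PySem.Set.empty := by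
  refine ⟨by simp [PySem.Set.empty], by simp [PySem.Set.empty], ?_, ?_⟩ <;>
    intro p <;> simp [PySem.Dict.getD_empty, PySem.Set.empty]

theorem pvCount_eq (adj : PySem.Dict (String × Int) (PySem.Set (String × Int)))
    (dedup : List ((String × Int) × (String × Int))) (h : pvInv adj dedup) (p : String × Int) :
    dedup.countP (fun e => e.1 == p || e.2 == p) = (adj.getD p []).length := by
  obtain ⟨hnorm, hnd, hvnd, hmem⟩ := h
  rw [List.countP_eq_length_filter]
  have hperm : (dedup.filter (fun e => e.1 == p || e.2 == p)).Perm
      ((adj.getD p []).map (fun v => pvNorm (p, v))) := by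
    apply List.perm_of_nodup_nodup_toFinset_eq
    · exact hnd.filter _
    · exact (hvnd p).map (fun v w hvw => pvNorm_inj p v w hvw)
    · apply Finset.ext
      intro e
      simp only [List.mem_toFinset, List.mem_filter, List.mem_map]
      constructor
      · rintro ⟨he, ht⟩
        simp only [Bool.or_eq_true, beq_iff_eq] at ht
        rcases ht with ht | ht
        · exact ⟨e.2, (hmem p e.2).mpr (by rw [pvNorm_of_fst e p (hnorm e he) ht]; exact he),
            pvNorm_of_fst e p (hnorm e he) ht⟩
        · exact ⟨e.1, (hmem p e.1).mpr (by rw [pvNorm_of_snd e p (hnorm e he) ht]; exact he),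
            pvNorm_of_snd e p (hnorm e he) ht⟩
      · rintro ⟨v, hv, hrfl⟩
        refine ⟨by rw [← hrfl]; exact (hmem p v).mp hv, ?_⟩
        simp only [Bool.or_eq_true, beq_iff_eq]
        rw [← hrfl]; exact pvNorm_touch p v
  rw [hperm.length_eq, List.length_map]

-- ===== VERDICT (by name: the statement is the Claim_ definition above) =====
theorem check_port_degrees_spec : Claim_equal_check_port_degrees := by
  intro edges _
  unfold Spec_check_port_degrees check_port_degrees check_port_degrees_alt pvBuildAdjacency
  have hinv := pvInv_fold edges PySem.Dict.empty PySem.Set.empty pvInv_empty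
  have hcnt := pvCount_eq _ _ hinv
  simp only [List.all_append, List.all_map, hcnt]
  simp [Function.comp_def, Bool.and_assoc]
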